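-- pv_equiv track=rewrite | github.com/meov1039-dotcom/ECEN4933_final_project | Final_project_check/hierarchy_1.py | vis_to_so
-- ===== SOURCE A (Python) =====
-- visBOL_so = ["SO:0000316", "SO:0000297", "SO:0000409", "SO:0000553", "SO:0005850", "SO:0000167",
--              "SO:0000410", "SO:0000139", "SO:0000296", "SO:0000141"]
--
-- def vis_to_so(so_numbers, ann_name):
--
--     part_feat = []
--     parts_so = []
--     parts_i = []
--     vis_parts = []
--
--     for i, so in enumerate(so_numbers):
--         if so in visBOL_so:
--             parts_so.append(so)
--             parts_i.append(i)
--
--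
--     for i, name in enumerate(ann_name):
--         if i in parts_i:
--             vis_parts.append(name)
--
--     return vis_parts
-- ===== SOURCE B (Python) =====
-- visBOL_so = ["SO:0000316", "SO:0000297", "SO:0000409", "SO:0000553", "SO:0005850", "SO:0000167",
--              "SO:0000410", "SO:0000139", "SO:0000296", "SO:0000141"]
--
-- def vis_to_so(so_numbers, ann_name):
--     return [name for so, name in zip(so_numbers, ann_name) if so in visBOL_so]
-- ===== Notes on version B (the rewrite author's own statement) =====
-- stated objective: simpler
-- what changed: B fuses A's two passes (building an index table parts_i, then rescanning ann_name against it) into one comprehension over zip(so_numbers, ann_name), keeping no index table.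
import Mathlib
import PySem

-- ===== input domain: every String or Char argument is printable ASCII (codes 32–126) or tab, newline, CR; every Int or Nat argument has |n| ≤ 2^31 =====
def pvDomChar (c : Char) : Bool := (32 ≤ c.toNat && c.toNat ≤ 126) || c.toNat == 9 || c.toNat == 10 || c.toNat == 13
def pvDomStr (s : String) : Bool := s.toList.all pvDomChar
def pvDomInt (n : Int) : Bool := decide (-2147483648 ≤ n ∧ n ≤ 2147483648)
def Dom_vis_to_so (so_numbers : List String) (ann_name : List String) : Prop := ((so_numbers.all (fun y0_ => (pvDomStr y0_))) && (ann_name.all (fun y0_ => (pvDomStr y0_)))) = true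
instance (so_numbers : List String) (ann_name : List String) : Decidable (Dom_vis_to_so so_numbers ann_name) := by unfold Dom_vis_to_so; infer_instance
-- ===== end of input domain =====

-- B replaces A's two passes (index table parts_i, then rescanning ann_name) with one
-- fused comprehension over zip(so_numbers, ann_name); objective: simpler.

-- module constant shared by both versions
def visBOL_so : List String :=
  ["SO:0000316", "SO:0000297", "SO:0000409", "SO:0000553", "SO:0005850", "SO:0000167",
   "SO:0000410", "SO:0000139", "SO:0000296", "SO:0000141"]

-- ===== PORT A =====
def vis_to_so (so_numbers : List String) (ann_name : List String) : List String :=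
  -- part_feat = [] is never used in A; parts_so/parts_i are the loop's pair state
  let parts : List String × List Int :=
    (PySem.List.enumerate so_numbers).foldl
      (fun st p => if visBOL_so.contains p.2 then (st.1 ++ [p.2], st.2 ++ [p.1]) else st)
      ([], [])
  (PySem.List.enumerate ann_name).foldl
    (fun vis_parts p => if parts.2.contains p.1 then vis_parts ++ [p.2] else vis_parts)
    []

-- ===== PORT B =====
def vis_to_so_alt (so_numbers : List String) (ann_name : List String) : List String :=
  (so_numbers.zip ann_name).filterMap
    (fun p => if visBOL_so.contains p.1 then some p.2 else none)

-- ===== PRECONDITION & SPEC =====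
def Spec_vis_to_so (so_numbers : List String) (ann_name : List String) (out : List String) : Prop := out = vis_to_so_alt so_numbers ann_name
instance (so_numbers : List String) (ann_name : List String) (out : List String) : Decidable (Spec_vis_to_so so_numbers ann_name out) := by unfold Spec_vis_to_so; infer_instance

-- ===== CLAIM (what is proved, stated in full; the proofs are below) =====
def Claim_equal_vis_to_so : Prop := ∀ (so_numbers : List String) (ann_name : List String), Dom_vis_to_so so_numbers ann_name → Spec_vis_to_so so_numbers ann_name (vis_to_so so_numbers ann_name)

-- ===== LEMMAS AND PROOFS =====

-- the index table A builds, as a filter/map, parameterised by the enumerate start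
def piOf (so : List String) (s : Int) : List Int :=
  ((PySem.List.enumerate so s).filter (fun p => visBOL_so.contains p.2)).map Prod.fst

theorem piOf_nil (s : Int) : piOf [] s = [] := by
  simp [piOf, PySem.List.enumerate_nil]

theorem piOf_cons (x : String) (so : List String) (s : Int) :
    piOf (x :: so) s = (if x ∈ visBOL_so then [s] else []) ++ piOf so (s + 1) := by
  by_cases h : x ∈ visBOL_so <;>
    simp [piOf, PySem.List.enumerate_cons, h]

theorem piOf_lb (so : List String) (s i : Int) (h : i ∈ piOf so s) : s ≤ i := by
  induction so generalizing s with
  | nil => simp [piOf_nil] at h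
  | cons x so ih =>
    rw [piOf_cons] at h
    rcases List.mem_append.mp h with h' | h'
    · split at h' <;> simp at h'; omega
    · have := ih (s + 1) h'; omega

-- A's first loop: the second component of the pair state is piOf
theorem foldl_pair_snd (l : List (Int × String)) (st : List String × List Int) :
    ((l.foldl (fun st p => if visBOL_so.contains p.2 then (st.1 ++ [p.2], st.2 ++ [p.1]) else st) st).2)
      = st.2 ++ (l.filter (fun p => visBOL_so.contains p.2)).map Prod.fst := by
  induction l generalizing st with
  | nil => simp
  | cons p l ih =>
    rw [List.foldl_cons, ih]
    by_cases h : p.2 ∈ visBOL_so <;>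
      simp [h]

-- the main equivalence, generalised over the enumerate start
theorem main_lemma (ann so : List String) (s : Int) :
    ((PySem.List.enumerate ann s).filter (fun p => (piOf so s).contains p.1)).map Prod.snd
      = (so.zip ann).filterMap (fun p => if visBOL_so.contains p.1 then some p.2 else none) := by
  induction ann generalizing so s with
  | nil => simp [PySem.List.enumerate_nil]
  | cons y ann ih =>
    cases so with
    | nil => simp [piOf_nil, PySem.List.enumerate_cons]
    | cons x so =>
      have hs : (s : Int) ∉ piOf so (s + 1) :=
        fun hc => absurd (piOf_lb so (s + 1) s hc) (by omega)
      have tail : ∀ p ∈ PySem.List.enumerate ann (s + 1),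
          (fun p => (piOf (x :: so) s).contains p.1) p
            = (fun p => (piOf so (s + 1)).contains p.1) p := by
        intro p hp
        have hlb : s + 1 ≤ p.1 := by
          rcases (PySem.List.mem_enumerate_iff ann (s + 1) p).mp hp with ⟨k, hk, rfl⟩
          have hfst : ((s + 1 + (k : Int), ann[k]) : Int × String).1 = s + 1 + (k : Int) := rfl
          rw [hfst]; omega
        have hne : ¬ (p.1 = s) := by omega
        by_cases h : x ∈ visBOL_so <;> simp [piOf_cons, h, hne]
      rw [PySem.List.enumerate_cons, List.filter_cons, List.filter_congr tail]
      by_cases h : x ∈ visBOL_so <;>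
        simp [piOf_cons, h, hs] <;> simpa using ih so (s + 1)

-- ===== VERDICT (by name: the statement is the Claim_ definition above) =====
theorem vis_to_so_spec : Claim_equal_vis_to_so := by
  intro so ann _
  show vis_to_so so ann = vis_to_so_alt so ann
  unfold vis_to_so vis_to_so_alt
  rw [PySem.List.foldl_append_if (f := Prod.snd), foldl_pair_snd]
  simpa [piOf] using main_lemma ann so 0
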